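-- pv_equiv track=rewrite | github.com/MoldoAndr/bull-s_eye | worker/scanners/js_scanners.py | _extract_json_payload
-- ===== SOURCE A (Python) =====
-- def _extract_json_payload(raw: str) -> str:
--     if raw.startswith("{") or raw.startswith("["):
--         return raw
--
--     candidates = []
--     for marker in ("{", "["):
--         idx = raw.find(marker)
--         if idx >= 0:
--             candidates.append(idx)
--     if not candidates:
--         return ""
--     start = min(candidates)
--     return raw[start:]
-- ===== SOURCE B (Python) =====
-- def _extract_json_payload(raw: str) -> str:
--     for i, ch in enumerate(raw):
--         if ch in "{[":
--             return raw[i:]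
--     return ""
-- ===== Notes on version B (the rewrite author's own statement) =====
-- stated objective: simpler
-- what changed: Replaces the startswith shortcut plus two str.find passes and a min over a candidates list with one linear scan that returns the suffix at the first '{' or '[' character.
import Mathlib
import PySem

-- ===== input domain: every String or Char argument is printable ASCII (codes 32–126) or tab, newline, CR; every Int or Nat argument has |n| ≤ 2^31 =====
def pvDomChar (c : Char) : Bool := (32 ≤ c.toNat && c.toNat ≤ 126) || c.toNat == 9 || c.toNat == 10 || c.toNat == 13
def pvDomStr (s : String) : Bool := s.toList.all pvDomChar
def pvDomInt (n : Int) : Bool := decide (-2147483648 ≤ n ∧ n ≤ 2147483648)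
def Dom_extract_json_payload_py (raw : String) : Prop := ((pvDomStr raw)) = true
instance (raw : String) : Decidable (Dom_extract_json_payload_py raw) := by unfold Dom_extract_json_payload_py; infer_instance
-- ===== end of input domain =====

-- ===== PORT A =====
-- Literal port of A: startswith shortcut, two finds folded into a candidates list, min, slice.
def extract_json_payload_py (raw : String) : String :=
  if PySem.Str.startswith raw "{" || PySem.Str.startswith raw "[" then raw
  else
    let candidates := (["{", "["]).foldl (fun acc marker =>
      let idx := PySem.Str.find raw marker
      if 0 ≤ idx then acc ++ [idx] else acc) ([] : List Int)
    if candidates = [] then ""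
    else
      match PySem.List.min? candidates (fun x => x) with
      | none => ""
      | some start => PySem.Str.slice raw (some start) none

-- ===== PORT B =====
-- single scan: first index whose character is '{' or '['
def pvFirstBracket : List Char → Nat → Option Nat
  | [], _ => none
  | c :: rest, i => if c = '{' || c = '[' then some i else pvFirstBracket rest (i + 1)

def extract_json_payload_py_alt (raw : String) : String :=
  match pvFirstBracket raw.toList 0 with
  | none => ""
  | some i => PySem.Str.slice raw (some (i : Int)) none

-- ===== PRECONDITION & SPEC =====
def Spec_extract_json_payload_py (raw : String) (out : String) : Prop := out = extract_json_payload_py_alt raw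
instance (raw : String) (out : String) : Decidable (Spec_extract_json_payload_py raw out) := by unfold Spec_extract_json_payload_py; infer_instance

-- ===== CLAIM (what is proved, stated in full; the proofs are below) =====
def Claim_equal_extract_json_payload_py : Prop := ∀ (raw : String), Dom_extract_json_payload_py raw → Spec_extract_json_payload_py raw (extract_json_payload_py raw)

-- ===== LEMMAS AND PROOFS =====

-- A's candidate-selection on the two find results, as a single function.
def pvAPick (f1 f2 : Int) : Option Int :=
  PySem.List.min? ((if 0 ≤ f1 then [f1] else []) ++ (if 0 ≤ f2 then [f2] else [])) (fun x => x)

theorem pvGo_lb (m : Char) (cs : List Char) (k : Nat) :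
    PySem.Chars.find.go [m] cs k = -1 ∨ (k : Int) ≤ PySem.Chars.find.go [m] cs k := by
  induction cs generalizing k with
  | nil => left; rfl
  | cons c t ih =>
    by_cases h : [m].isPrefixOf (c :: t)
    · right; simp [PySem.Chars.find.go, h]
    · rcases ih (k + 1) with h1 | h1
      · simp [PySem.Chars.find.go, h, h1]
      · simp [PySem.Chars.find.go, h, h1]
        omega

theorem pvKey (cs : List Char) (k : Nat) :
    pvAPick (PySem.Chars.find.go ['{'] cs k) (PySem.Chars.find.go ['['] cs k)
      = (pvFirstBracket cs k).map (fun i => (i : Int)) := by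
  induction cs generalizing k with
  | nil => rfl
  | cons c t ih =>
    by_cases h1 : c = '{'
    · subst h1
      rcases pvGo_lb '[' t (k + 1) with h | h
      · simp [PySem.Chars.find.go, pvFirstBracket, pvAPick, List.isPrefixOf,
          PySem.List.min?_id_cons, h]
      · have h0 : (0 : Int) ≤ PySem.Chars.find.go ['['] t (k + 1) := by omega
        have hmin : min ((k : Nat) : Int) (PySem.Chars.find.go ['['] t (k + 1)) = ((k : Nat) : Int) := by
          apply min_eq_left; omega
        simp [PySem.Chars.find.go, pvFirstBracket, pvAPick, List.isPrefixOf,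
          PySem.List.min?_id_cons, h0, hmin]
    · by_cases h2 : c = '['
      · subst h2
        rcases pvGo_lb '{' t (k + 1) with h | h
        · simp [PySem.Chars.find.go, pvFirstBracket, pvAPick, List.isPrefixOf,
            PySem.List.min?_id_cons, h]
        · have h0 : (0 : Int) ≤ PySem.Chars.find.go ['{'] t (k + 1) := by omega
          have hmin : min (PySem.Chars.find.go ['{'] t (k + 1)) ((k : Nat) : Int) = ((k : Nat) : Int) := by
            apply min_eq_right; omega
          simp [PySem.Chars.find.go, pvFirstBracket, pvAPick, List.isPrefixOf,
            PySem.List.min?_id_cons, h0, hmin]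
      · have h1' : ¬('{' = c) := fun e => h1 e.symm
        have h2' : ¬('[' = c) := fun e => h2 e.symm
        have := ih (k + 1)
        simp_all [PySem.Chars.find.go, pvFirstBracket, List.isPrefixOf]

-- ===== VERDICT (by name: the statement is the Claim_ definition above) =====
theorem extract_json_payload_py_spec : Claim_equal_extract_json_payload_py := by
  intro raw _
  unfold Spec_extract_json_payload_py extract_json_payload_py extract_json_payload_py_alt
  have hf1 : PySem.Str.find raw "{" = PySem.Chars.find.go ['{'] raw.toList 0 := by
    simp [PySem.Chars.find]
  have hf2 : PySem.Str.find raw "[" = PySem.Chars.find.go ['['] raw.toList 0 := by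
    simp [PySem.Chars.find]
  have hK := pvKey raw.toList 0
  by_cases hs : (PySem.Str.startswith raw "{" || PySem.Str.startswith raw "[") = true
  · rw [if_pos hs]
    rw [Bool.or_eq_true] at hs
    have h0 : pvFirstBracket raw.toList 0 = some 0 := by
      rcases hs with h | h <;>
      · simp only [PySem.Str.startswith_eq] at h
        rw [PySem.Chars.startswith_iff] at h
        obtain ⟨t, ht⟩ := h
        rw [← ht]
        simp [pvFirstBracket]
    rw [h0]
    exact (by simp [PySem.Str.slice] :
      PySem.Str.slice raw (some ((0 : Nat) : Int)) none = raw).symm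
  · rw [if_neg hs]
    have hC : (["{", "["]).foldl (fun acc marker =>
        let idx := PySem.Str.find raw marker
        if 0 ≤ idx then acc ++ [idx] else acc) ([] : List Int)
        = (if 0 ≤ PySem.Chars.find.go ['{'] raw.toList 0 then
             [PySem.Chars.find.go ['{'] raw.toList 0] else []) ++
          (if 0 ≤ PySem.Chars.find.go ['['] raw.toList 0 then
             [PySem.Chars.find.go ['['] raw.toList 0] else []) := by
      simp only [List.foldl, hf1, hf2]
      split_ifs <;> simp
    cases h : pvFirstBracket raw.toList 0 with
    | none =>
      rw [h] at hK
      unfold pvAPick at hK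
      simp at hK
      have hk1 : ¬ (0 : Int) ≤ PySem.Chars.find raw.toList ['{'] := not_le.mpr hK.1
      have hk2 : ¬ (0 : Int) ≤ PySem.Chars.find raw.toList ['['] := not_le.mpr hK.2
      simp [hk1, hk2]
    | some i =>
      rw [h] at hK
      unfold pvAPick at hK
      simp at hK
      have hne : ((if 0 ≤ PySem.Chars.find.go ['{'] raw.toList 0 then
             [PySem.Chars.find.go ['{'] raw.toList 0] else []) ++
          (if 0 ≤ PySem.Chars.find.go ['['] raw.toList 0 then
             [PySem.Chars.find.go ['['] raw.toList 0] else [])) ≠ [] := by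
        intro he
        rw [(PySem.List.min?_eq_none_iff _ (fun x => x)).mpr he] at hK
        simp at hK
      simp only [hC, if_neg hne, hK]
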